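-- pv_equiv track=rewrite | github.com/albicilla/gomogomo | hard.py | CountStonesInDirection
-- ===== SOURCE A (Python) =====
-- N = 15
--
-- def CountStonesInDirection(field, position, diff, stone):
--   field[position[0]][position[1]] = stone
--   max_count = 0
--   for start in range(5):
--     row = position[0] - start * diff[0]
--     col = position[1] - start * diff[1]
--     i = 0
--     count = 0
--     while i < 5:
--       if row < 0 or col < 0 or row >= N or col >= N:
--         break
--       if field[row][col] != stone and field[row][col] != '.':
--         break
--       if field[row][col] == stone:
--         count += 1
--       elif field[row][col] == '.':
--         count = 0
--       row += diff[0]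
--       col += diff[1]
--       i += 1
--     if i == 5 and count > max_count:
--       max_count = count
--   field[position[0]][position[1]] = '.'
--   return max_count
-- ===== SOURCE B (Python) =====
-- N = 15
--
-- def CountStonesInDirection(field, position, diff, stone):
--     r0, c0 = position[0], position[1]
--     field[r0][c0] = stone
--     best = 0
--     run = 0      # consecutive own stones ending at the current offset
--     streak = 0   # consecutive on-board friendly (stone or '.') cells ending here
--     for k in range(-4, 5):
--         r = r0 + k * diff[0]
--         c = c0 + k * diff[1]
--         cell = None
--         if 0 <= r < N and 0 <= c < N and r < len(field) and c < len(field[r]):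
--             cell = field[r][c]
--         if cell == stone:
--             run += 1
--             streak += 1
--         elif cell == '.':
--             run = 0
--             streak += 1
--         else:
--             run = 0
--             streak = 0
--         if k >= 0 and streak >= 5:
--             if min(run, 5) > best:
--                 best = min(run, 5)
--     field[r0][c0] = '.'
--     return best
-- ===== Notes on version B (the rewrite author's own statement) =====
-- stated objective: alternative
-- what changed: B replaces A's five per-start window re-scans by one streaming pass over the 9 cells at offsets -4..4 that maintains two running counters (current stone run, current on-board-friendly streak) and at each offset 0..4 takes min(run,5) when the streak shows a full valid window, so no window is ever enumerated or re-walked.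
-- outside the precondition, e.g. on CountStonesInDirection([['.', 'z']], [0, 0], [0, 1], 'o'): A returns 0, B returns 0
import Mathlib
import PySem

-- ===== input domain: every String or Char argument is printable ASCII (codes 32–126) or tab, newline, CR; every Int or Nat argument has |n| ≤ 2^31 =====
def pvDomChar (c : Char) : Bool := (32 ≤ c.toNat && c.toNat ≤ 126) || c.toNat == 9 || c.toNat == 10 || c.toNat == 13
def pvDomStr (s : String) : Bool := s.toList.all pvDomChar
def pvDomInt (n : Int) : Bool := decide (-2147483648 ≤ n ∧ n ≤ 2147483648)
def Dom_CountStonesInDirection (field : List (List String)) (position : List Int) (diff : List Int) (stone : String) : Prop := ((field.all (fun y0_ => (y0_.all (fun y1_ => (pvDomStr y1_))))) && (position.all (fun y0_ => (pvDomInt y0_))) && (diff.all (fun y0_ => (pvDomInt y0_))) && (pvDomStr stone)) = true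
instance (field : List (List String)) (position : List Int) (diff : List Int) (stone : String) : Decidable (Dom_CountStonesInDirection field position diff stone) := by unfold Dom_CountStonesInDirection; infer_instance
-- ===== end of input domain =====

-- B replaces A's five per-start window scans by one streaming pass over the 9 cells at offsets
-- -4..4 maintaining a current stone-run and an on-board-friendly streak; return-value equivalence
-- only (both Pythons set field[position] to stone and restore '.').


-- ===== PORT A =====
-- field[r][c] for r,c already guarded nonnegative (exact under Pre_: the guarded cell exists)
def pvCell (F : List (List String)) (r c : Int) : String :=
  (F.getD r.toNat []).getD c.toNat ""

-- Python index wraparound for a valid (possibly negative) index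
def pyWrap (n : Nat) (i : Int) : Nat := (if i < 0 then i + n else i).toNat

-- field[position[0]][position[1]] = stone (exact under Pre_: a valid Python index, negatives wrap)
def pvSetCell (F : List (List String)) (r c : Int) (v : String) : List (List String) :=
  F.set (pyWrap F.length r) ((F.getD (pyWrap F.length r) []).set (pyWrap (F.getD (pyWrap F.length r) []).length c) v)

-- A's inner `while i < 5` loop; returns (i, count) at exit
def whileA (F : List (List String)) (stone : String) (dr dc : Int) (row col : Int) (i : Nat) (count : Int) : Nat × Int :=
  if _h : i < 5 then
    if row < 0 ∨ col < 0 ∨ 15 ≤ row ∨ 15 ≤ col then (i, count)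
    else if pvCell F row col ≠ stone ∧ pvCell F row col ≠ "." then (i, count)
    else
      whileA F stone dr dc (row + dr) (col + dc) (i + 1)
        (if pvCell F row col = stone then count + 1
         else if pvCell F row col = "." then 0 else count)
  else (i, count)
termination_by 5 - i

def CountStonesInDirection (field : List (List String)) (position : List Int) (diff : List Int) (stone : String) : Int :=
  let r0 := position.getD 0 0
  let c0 := position.getD 1 0
  let dr := diff.getD 0 0
  let dc := diff.getD 1 0
  let F := pvSetCell field r0 c0 stone
  ([0, 1, 2, 3, 4] : List Int).foldl
    (fun mx start =>
      let res := whileA F stone dr dc (r0 - start * dr) (c0 - start * dc) 0 0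
      if res.1 = 5 ∧ res.2 > mx then res.2 else mx) 0

-- ===== PORT B =====
-- cell at (r,c), or the None sentinel when (r,c) is outside the 15×15 bound or missing from field
def pvCellAt (F : List (List String)) (r c : Int) : Option String :=
  if (0 ≤ r ∧ r < 15 ∧ 0 ≤ c ∧ c < 15) ∧
     (r < (F.length : Int) ∧ c < ((F.getD r.toNat []).length : Int))
  then some (pvCell F r c) else none

-- Source B: one pass over offsets -4..4 with state (best, run, streak)
def CountStonesInDirection_alt (field : List (List String)) (position : List Int) (diff : List Int) (stone : String) : Int :=
  let r0 := position.getD 0 0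
  let c0 := position.getD 1 0
  let dr := diff.getD 0 0
  let dc := diff.getD 1 0
  let F := pvSetCell field r0 c0 stone
  (([-4, -3, -2, -1, 0, 1, 2, 3, 4] : List Int).foldl
    (fun (st : Int × Int × Int) k =>
      let cell := pvCellAt F (r0 + k * dr) (c0 + k * dc)
      let rs := if cell = some stone then (st.2.1 + 1, st.2.2 + 1)
                else if cell = some "." then ((0 : Int), st.2.2 + 1)
                else ((0 : Int), (0 : Int))
      (if 0 ≤ k ∧ 5 ≤ rs.2 ∧ min rs.1 5 > st.1 then min rs.1 5 else st.1, rs))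
    ((0 : Int), (0 : Int), (0 : Int))).1

-- ===== PRECONDITION & SPEC =====
-- Pre_ admits inputs whose position/diff carry both coordinates, whose centre is a valid Python
-- index (negatives wrap), and in which every scan-window cell preceded only by in-bound cells
-- (hence visitable by A) exists in field, so A's board accesses cannot raise; it excludes ragged
-- boards on which A survives a missing visitable cell only through a content-dependent early
-- break (and otherwise exits with IndexError) — see the cite in claim.json for an excluded input
-- on which A still returns.
def Pre_CountStonesInDirection (field : List (List String)) (position : List Int) (diff : List Int) (stone : String) : Prop :=
  2 ≤ position.length ∧ 2 ≤ diff.length ∧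
  -(field.length : Int) ≤ position.getD 0 0 ∧ position.getD 0 0 < (field.length : Int) ∧
  -((field.getD (pyWrap field.length (position.getD 0 0)) []).length : Int) ≤ position.getD 1 0 ∧
  position.getD 1 0 < ((field.getD (pyWrap field.length (position.getD 0 0)) []).length : Int) ∧
  ∀ s ∈ ([0, 1, 2, 3, 4] : List Int), ∀ j : Nat, j < 5 →
    (∀ j' : Nat, j' ≤ j →
      (0 ≤ (position.getD 0 0 - s * diff.getD 0 0) + j' * diff.getD 0 0 ∧
       (position.getD 0 0 - s * diff.getD 0 0) + j' * diff.getD 0 0 < 15 ∧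
       0 ≤ (position.getD 1 0 - s * diff.getD 1 0) + j' * diff.getD 1 0 ∧
       (position.getD 1 0 - s * diff.getD 1 0) + j' * diff.getD 1 0 < 15)) →
    ((position.getD 0 0 - s * diff.getD 0 0) + j * diff.getD 0 0 < (field.length : Int) ∧
     (position.getD 1 0 - s * diff.getD 1 0) + j * diff.getD 1 0 <
       ((field.getD ((position.getD 0 0 - s * diff.getD 0 0) + j * diff.getD 0 0).toNat []).length : Int))

instance (field : List (List String)) (position : List Int) (diff : List Int) (stone : String) : Decidable (Pre_CountStonesInDirection field position diff stone) := by unfold Pre_CountStonesInDirection; infer_instance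

def pvWitness_CountStonesInDirection : List (List String) × List Int × List Int × String :=
  ([["o", "o", ".", ".", "."]], [0, 0], [0, 1], "o")

def Spec_CountStonesInDirection (field : List (List String)) (position : List Int) (diff : List Int) (stone : String) (out : Int) : Prop := out = CountStonesInDirection_alt field position diff stone
instance (field : List (List String)) (position : List Int) (diff : List Int) (stone : String) (out : Int) : Decidable (Spec_CountStonesInDirection field position diff stone out) := by unfold Spec_CountStonesInDirection; infer_instance

-- ===== CLAIM (what is proved, stated in full; the proofs are below) =====
def Claim_equal_CountStonesInDirection : Prop := ∀ (field : List (List String)) (position : List Int) (diff : List Int) (stone : String), Dom_CountStonesInDirection field position diff stone → Pre_CountStonesInDirection field position diff stone → Spec_CountStonesInDirection field position diff stone (CountStonesInDirection field position diff stone)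

-- ===== LEMMAS AND PROOFS =====

-- abstract run of A's inner loop over a precomputed list of option-cells
def runG (stone : String) : List (Option String) → Nat → Int → Nat × Int
  | [], i, count => (i, count)
  | none :: _, i, count => (i, count)
  | some cell :: rest, i, count =>
    if cell ≠ stone ∧ cell ≠ "." then (i, count)
    else runG stone rest (i + 1)
      (if cell = stone then count + 1 else if cell = "." then 0 else count)

-- the n cells from (r,c) stepping by (dr,dc)
def cells (F : List (List String)) (dr dc : Int) : Nat → Int → Int → List (Option String)
  | 0, _, _ => []
  | n + 1, r, c => pvCellAt F r c :: cells F dr dc n (r + dr) (c + dc)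

lemma whileA_eq_runG (F : List (List String)) (stone : String) (dr dc : Int) :
    ∀ (n : Nat) (row col : Int) (i : Nat) (count : Int), i + n = 5 →
      (∀ j : Nat, j < n →
        (∀ j' : Nat, j' ≤ j →
          (0 ≤ row + j' * dr ∧ row + j' * dr < 15 ∧ 0 ≤ col + j' * dc ∧ col + j' * dc < 15)) →
        (row + j * dr < (F.length : Int) ∧
         col + j * dc < ((F.getD (row + j * dr).toNat []).length : Int))) →
      whileA F stone dr dc row col i count = runG stone (cells F dr dc n row col) i count := by
  intro n
  induction n with
  | zero =>
    intro row col i count h _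
    rw [whileA, cells]
    simp [runG, show ¬ i < 5 by omega]
  | succ n ih =>
    intro row col i count h hex
    have er : row + ((0 : Nat) : Int) * dr = row := by push_cast; ring
    have ec : col + ((0 : Nat) : Int) * dc = col := by push_cast; ring
    rw [whileA, dif_pos (show i < 5 by omega), cells]
    by_cases hb : row < 0 ∨ col < 0 ∨ 15 ≤ row ∨ 15 ≤ col
    · have hnone : pvCellAt F row col = none := by
        unfold pvCellAt
        rw [if_neg]
        intro hcond
        rcases hcond.1 with ⟨h1, h2, h3, h4⟩
        omega
      rw [if_pos hb, hnone, runG]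
    · have hin : 0 ≤ row ∧ row < 15 ∧ 0 ≤ col ∧ col < 15 := by omega
      have hex0 := hex 0 (by omega) (by
        intro j' hj'
        have : j' = 0 := by omega
        subst this
        rw [er, ec]
        exact hin)
      rw [er, ec] at hex0
      have hsome : pvCellAt F row col = some (pvCell F row col) := by
        unfold pvCellAt
        rw [if_pos ⟨hin, hex0⟩]
      rw [if_neg hb, hsome, runG]
      have hex' : ∀ j : Nat, j < n →
          (∀ j' : Nat, j' ≤ j →
            (0 ≤ (row + dr) + j' * dr ∧ (row + dr) + j' * dr < 15 ∧
             0 ≤ (col + dc) + j' * dc ∧ (col + dc) + j' * dc < 15)) →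
          ((row + dr) + j * dr < (F.length : Int) ∧
           (col + dc) + j * dc < ((F.getD ((row + dr) + j * dr).toNat []).length : Int)) := by
        intro j hj hpfx
        have harg : ∀ m : Nat, row + ((m + 1 : Nat) : Int) * dr = (row + dr) + m * dr := by
          intro m; push_cast; ring
        have hargc : ∀ m : Nat, col + ((m + 1 : Nat) : Int) * dc = (col + dc) + m * dc := by
          intro m; push_cast; ring
        have := hex (j + 1) (by omega) (by
          intro j' hj'
          cases j' with
          | zero => rw [er, ec]; exact hin
          | succ m =>
            rw [harg m, hargc m]
            exact hpfx m (by omega))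
        rw [harg j, hargc j] at this
        exact this
      by_cases hc : pvCell F row col ≠ stone ∧ pvCell F row col ≠ "."
      · rw [if_pos hc, if_pos hc]
      · rw [if_neg hc, if_neg hc, ih (row + dr) (col + dc) (i + 1) _ (by omega) hex']

lemma cells_five (F : List (List String)) (dr dc : Int) (r c : Int) :
    cells F dr dc 5 r c =
      [pvCellAt F r c, pvCellAt F (r + dr) (c + dc), pvCellAt F (r + dr + dr) (c + dc + dc),
       pvCellAt F (r + dr + dr + dr) (c + dc + dc + dc),
       pvCellAt F (r + dr + dr + dr + dr) (c + dc + dc + dc + dc)] := by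
  simp [cells]

lemma pvCellAt_congr (F : List (List String)) {a b a' b' : Int} (ha : a = a') (hb : b = b') :
    pvCellAt F a b = pvCellAt F a' b' := by rw [ha, hb]

-- classification of an optional cell: 0 = own stone, 1 = empty '.', 2 = bad (off-board or foe)
def classify (stone : String) (o : Option String) : Fin 3 :=
  if o = some stone then 0 else if o = some "." then 1 else 2

-- runG with cells replaced by their classifications
def runC : List (Fin 3) → Nat → Int → Nat × Int
  | [], i, count => (i, count)
  | x :: rest, i, count =>
    if x = 2 then (i, count)
    else runC rest (i + 1) (if x = 0 then count + 1 else 0)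

lemma runG_eq_runC (stone : String) :
    ∀ (l : List (Option String)) (i : Nat) (count : Int),
      runG stone l i count = runC (l.map (classify stone)) i count := by
  intro l
  induction l with
  | nil => intro i count; rfl
  | cons o rest ih =>
    intro i count
    match o with
    | none => simp [runG, classify, runC]
    | some cell =>
      by_cases h1 : cell = stone
      · subst h1
        simp [runG, classify, runC, ih]
      · by_cases h2 : cell = "."
        · subst h2
          simp [runG, classify, runC, h1, ih]
        · simp [runG, classify, runC, h1, h2]

-- B's streaming step on a classified cell
def bstepC (st : Int × Int × Int) (k : Int) (x : Fin 3) : Int × Int × Int :=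
  let rs := if x = 0 then (st.2.1 + 1, st.2.2 + 1)
            else if x = 1 then ((0 : Int), st.2.2 + 1)
            else ((0 : Int), (0 : Int))
  (if 0 ≤ k ∧ 5 ≤ rs.2 ∧ min rs.1 5 > st.1 then min rs.1 5 else st.1, rs)

lemma bstep_classify (stone : String) (o : Option String) (st : Int × Int × Int) (k : Int) :
    ((if 0 ≤ k ∧ 5 ≤ (if o = some stone then (st.2.1 + 1, st.2.2 + 1)
                      else if o = some "." then ((0 : Int), st.2.2 + 1)
                      else ((0 : Int), (0 : Int))).2 ∧
         min (if o = some stone then (st.2.1 + 1, st.2.2 + 1)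
              else if o = some "." then ((0 : Int), st.2.2 + 1)
              else ((0 : Int), (0 : Int))).1 5 > st.1
      then min (if o = some stone then (st.2.1 + 1, st.2.2 + 1)
                else if o = some "." then ((0 : Int), st.2.2 + 1)
                else ((0 : Int), (0 : Int))).1 5
      else st.1,
      (if o = some stone then (st.2.1 + 1, st.2.2 + 1)
       else if o = some "." then ((0 : Int), st.2.2 + 1)
       else ((0 : Int), (0 : Int)))) : Int × Int × Int)
    = bstepC st k (classify stone o) := by
  by_cases h1 : o = some stone
  · simp [bstepC, classify, h1]
  · by_cases h2 : o = some "."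
    · subst h2
      have h1' : ¬("." : String) = stone := by simpa using h1
      simp [bstepC, classify, h1']
    · simp [bstepC, classify, h1, h2]

-- the heart, over the nine classified cells: A's five window scans = B's single streaming pass
set_option maxHeartbeats 4000000 in
lemma core9 : ∀ (a b c d e f g h i : Fin 3),
    List.foldl (fun mx w => if (runC w 0 0).1 = 5 ∧ (runC w 0 0).2 > mx then (runC w 0 0).2 else mx)
      (0 : Int)
      [[e, f, g, h, i], [d, e, f, g, h], [c, d, e, f, g], [b, c, d, e, f], [a, b, c, d, e]]
    = (List.foldl (fun st (p : Int × Fin 3) => bstepC st p.1 p.2) ((0 : Int), (0 : Int), (0 : Int))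
        [(-4, a), (-3, b), (-2, c), (-1, d), (0, e), (1, f), (2, g), (3, h), (4, i)]).1 := by
  decide

-- the classified line cell at offset k
def oCls (F : List (List String)) (stone : String) (r0 c0 dr dc k : Int) : Fin 3 :=
  classify stone (pvCellAt F (r0 + k * dr) (c0 + k * dc))

lemma core (F : List (List String)) (stone : String) (r0 c0 dr dc : Int)
    (hpre : ∀ s ∈ ([0, 1, 2, 3, 4] : List Int), ∀ j : Nat, j < 5 →
      (∀ j' : Nat, j' ≤ j →
        (0 ≤ (r0 - s * dr) + j' * dr ∧ (r0 - s * dr) + j' * dr < 15 ∧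
         0 ≤ (c0 - s * dc) + j' * dc ∧ (c0 - s * dc) + j' * dc < 15)) →
      ((r0 - s * dr) + j * dr < (F.length : Int) ∧
       (c0 - s * dc) + j * dc < ((F.getD ((r0 - s * dr) + j * dr).toNat []).length : Int))) :
    ([0, 1, 2, 3, 4] : List Int).foldl
      (fun mx start =>
        let res := whileA F stone dr dc (r0 - start * dr) (c0 - start * dc) 0 0
        if res.1 = 5 ∧ res.2 > mx then res.2 else mx) 0
    = (([-4, -3, -2, -1, 0, 1, 2, 3, 4] : List Int).foldl
        (fun (st : Int × Int × Int) k =>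
          let cell := pvCellAt F (r0 + k * dr) (c0 + k * dc)
          let rs := if cell = some stone then (st.2.1 + 1, st.2.2 + 1)
                    else if cell = some "." then ((0 : Int), st.2.2 + 1)
                    else ((0 : Int), (0 : Int))
          (if 0 ≤ k ∧ 5 ≤ rs.2 ∧ min rs.1 5 > st.1 then min rs.1 5 else st.1, rs))
        ((0 : Int), (0 : Int), (0 : Int))).1 := by
  have key : ∀ (s k0 k1 k2 k3 k4 : Int), s ∈ ([0, 1, 2, 3, 4] : List Int) →
      k0 = 0 - s → k1 = 1 - s → k2 = 2 - s → k3 = 3 - s → k4 = 4 - s →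
      whileA F stone dr dc (r0 - s * dr) (c0 - s * dc) 0 0
        = runC [oCls F stone r0 c0 dr dc k0, oCls F stone r0 c0 dr dc k1,
                oCls F stone r0 c0 dr dc k2, oCls F stone r0 c0 dr dc k3,
                oCls F stone r0 c0 dr dc k4] 0 0 := by
    intro s k0 k1 k2 k3 k4 hs e0 e1 e2 e3 e4
    subst e0; subst e1; subst e2; subst e3; subst e4
    rw [whileA_eq_runG F stone dr dc 5 _ _ 0 0 rfl (hpre s hs), runG_eq_runC, cells_five]
    simp only [List.map, oCls]
    rw [pvCellAt_congr F (show r0 - s * dr = r0 + (0 - s) * dr by ring)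
          (show c0 - s * dc = c0 + (0 - s) * dc by ring),
        pvCellAt_congr F (show r0 - s * dr + dr = r0 + (1 - s) * dr by ring)
          (show c0 - s * dc + dc = c0 + (1 - s) * dc by ring),
        pvCellAt_congr F (show r0 - s * dr + dr + dr = r0 + (2 - s) * dr by ring)
          (show c0 - s * dc + dc + dc = c0 + (2 - s) * dc by ring),
        pvCellAt_congr F (show r0 - s * dr + dr + dr + dr = r0 + (3 - s) * dr by ring)
          (show c0 - s * dc + dc + dc + dc = c0 + (3 - s) * dc by ring),
        pvCellAt_congr F (show r0 - s * dr + dr + dr + dr + dr = r0 + (4 - s) * dr by ring)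
          (show c0 - s * dc + dc + dc + dc + dc = c0 + (4 - s) * dc by ring)]
  have hB : ([-4, -3, -2, -1, 0, 1, 2, 3, 4] : List Int).foldl
        (fun (st : Int × Int × Int) k =>
          let cell := pvCellAt F (r0 + k * dr) (c0 + k * dc)
          let rs := if cell = some stone then (st.2.1 + 1, st.2.2 + 1)
                    else if cell = some "." then ((0 : Int), st.2.2 + 1)
                    else ((0 : Int), (0 : Int))
          (if 0 ≤ k ∧ 5 ≤ rs.2 ∧ min rs.1 5 > st.1 then min rs.1 5 else st.1, rs))
        ((0 : Int), (0 : Int), (0 : Int))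
      = ([-4, -3, -2, -1, 0, 1, 2, 3, 4] : List Int).foldl
        (fun (st : Int × Int × Int) k => bstepC st k (oCls F stone r0 c0 dr dc k))
        ((0 : Int), (0 : Int), (0 : Int)) := by
    apply List.foldl_ext
    intro st k _
    exact bstep_classify stone (pvCellAt F (r0 + k * dr) (c0 + k * dc)) st k
  rw [hB]
  have h9 := core9 (oCls F stone r0 c0 dr dc (-4)) (oCls F stone r0 c0 dr dc (-3))
      (oCls F stone r0 c0 dr dc (-2)) (oCls F stone r0 c0 dr dc (-1))
      (oCls F stone r0 c0 dr dc 0) (oCls F stone r0 c0 dr dc 1)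
      (oCls F stone r0 c0 dr dc 2) (oCls F stone r0 c0 dr dc 3) (oCls F stone r0 c0 dr dc 4)
  simp only [List.foldl] at h9 ⊢
  rw [key 0 0 1 2 3 4 (by decide) (by norm_num) (by norm_num) (by norm_num) (by norm_num) (by norm_num),
      key 1 (-1) 0 1 2 3 (by decide) (by norm_num) (by norm_num) (by norm_num) (by norm_num) (by norm_num),
      key 2 (-2) (-1) 0 1 2 (by decide) (by norm_num) (by norm_num) (by norm_num) (by norm_num) (by norm_num),
      key 3 (-3) (-2) (-1) 0 1 (by decide) (by norm_num) (by norm_num) (by norm_num) (by norm_num) (by norm_num),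
      key 4 (-4) (-3) (-2) (-1) 0 (by decide) (by norm_num) (by norm_num) (by norm_num) (by norm_num) (by norm_num)]
  exact h9

-- pvSetCell preserves the outer length and every row length
lemma pvSetCell_length (f : List (List String)) (r c : Int) (v : String) :
    (pvSetCell f r c v).length = f.length := by
  simp [pvSetCell]

lemma pvSetCell_row_length (f : List (List String)) (r c : Int) (v : String) (i : Nat) :
    ((pvSetCell f r c v).getD i []).length = (f.getD i []).length := by
  unfold pvSetCell
  by_cases h : i = pyWrap f.length r
  · subst h
    by_cases hlt : pyWrap f.length r < f.length
    · rw [List.getD_eq_getElem?_getD, List.getElem?_set_self (by simpa using hlt)]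
      rw [List.getD_eq_getElem?_getD, List.getElem?_eq_getElem (by simpa using hlt)]
      simp [List.length_set, List.getD_eq_getElem?_getD, List.getElem?_eq_getElem hlt]
    · rw [List.set_eq_of_length_le (by omega)]
  · rw [List.getD_eq_getElem?_getD, List.getElem?_set_ne (by omega), ← List.getD_eq_getElem?_getD]

-- ===== VERDICT (by name: the statement is the Claim_ definition above) =====
theorem CountStonesInDirection_spec : Claim_equal_CountStonesInDirection := by
  intro field position diff stone _hDom hPre
  obtain ⟨_, _, _, _, _, _, h9⟩ := hPre
  unfold Spec_CountStonesInDirection CountStonesInDirection CountStonesInDirection_alt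
  apply core (pvSetCell field (position.getD 0 0) (position.getD 1 0) stone) stone
    (position.getD 0 0) (position.getD 1 0) (diff.getD 0 0) (diff.getD 1 0)
  intro s hs j hj hpfx
  have := h9 s hs j hj hpfx
  rw [pvSetCell_length, pvSetCell_row_length]
  exact this
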